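-- pv_equiv track=rewrite | github.com/GithubHungry/codewars_tasks | codewars_sandbox.py | solution_15
-- ===== SOURCE A (Python) =====
-- def solution_15(line: str, arr: list) -> str:
--     mas = []
--     for line_elem in line.split('\n'):
--         for index, char in enumerate(line_elem):
--             if char in arr:
--                 line_elem = line_elem[:index].rstrip()
--         mas.append(line_elem)
--     return str('\n'.join(mas))
-- ===== SOURCE B (Python) =====
-- def solution_15(line: str, arr: list) -> str:
--     stops = [c for c in arr if isinstance(c, str) and len(c) == 1]
--     out = []
--     for l in line.split('\n'):
--         positions = [p for p in (l.find(c) for c in stops) if p >= 0]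
--         if positions:
--             out.append(l[:min(positions)].rstrip())
--         else:
--             out.append(l)
--     return '\n'.join(out)
-- ===== Notes on version B (the rewrite author's own statement) =====
-- stated objective: alternative
-- what changed: Instead of A's per-character scan with repeated truncate-and-rstrip of a mutating line, B computes for each line the str.find position of every single-character element of arr, takes the minimum non-negative one, and cuts+rstrips once (or leaves the line unchanged).
import Mathlib
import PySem

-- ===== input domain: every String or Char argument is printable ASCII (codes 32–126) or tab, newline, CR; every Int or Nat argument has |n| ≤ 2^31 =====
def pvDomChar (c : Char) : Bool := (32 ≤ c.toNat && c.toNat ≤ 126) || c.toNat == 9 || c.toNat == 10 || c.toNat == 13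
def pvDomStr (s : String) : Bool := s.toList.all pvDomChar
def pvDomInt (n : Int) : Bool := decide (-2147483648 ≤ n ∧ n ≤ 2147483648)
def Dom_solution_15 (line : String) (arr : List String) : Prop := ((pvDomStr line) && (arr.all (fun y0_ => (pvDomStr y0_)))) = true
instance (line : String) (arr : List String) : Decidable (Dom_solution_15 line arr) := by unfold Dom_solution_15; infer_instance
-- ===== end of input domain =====

-- B replaces A's per-character scan (which repeatedly truncates and rstrips a mutating line) by one
-- str.find per single-character stop string, cutting once at the minimal hit; same cost, different algorithm.

-- ===== PORT A =====
-- literal transliteration of A (strings handled on the List Char side, as PySem prescribes)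
def solution_15 (line : String) (arr : List String) : String :=
  let mas : List (List Char) :=
    (PySem.Chars.splitOn line.toList ['\n']).foldl
      (fun mas le =>
        let le' :=
          (PySem.List.enumerate le 0).foldl
            (fun s p =>
              if arr.contains (String.ofList [p.2]) then
                PySem.Chars.rstrip (PySem.List.slice s none (some p.1))
              else s)
            le
        mas ++ [le'])
      []
  String.ofList (PySem.Chars.join ['\n'] mas)

-- ===== PORT B =====
-- literal transliteration of Source B ('if positions:' + 'min(positions)' is ported as the match on
-- PySem.List.min?, which is none exactly when positions is empty)
def solution_15_alt (line : String) (arr : List String) : String :=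
  let stops := arr.filter (fun c => PySem.Str.len c == 1)
  let out : List (List Char) :=
    (PySem.Chars.splitOn line.toList ['\n']).foldl
      (fun out l =>
        let positions :=
          (stops.map (fun c => PySem.Chars.find l c.toList)).filter (fun p => decide (0 ≤ p))
        match PySem.List.min? positions (fun x => x) with
        | some m => out ++ [PySem.Chars.rstrip (PySem.List.slice l none (some m))]
        | none => out ++ [l])
      []
  String.ofList (PySem.Chars.join ['\n'] out)

-- ===== PRECONDITION & SPEC =====
def Spec_solution_15 (line : String) (arr : List String) (out : String) : Prop := out = solution_15_alt line arr
instance (line : String) (arr : List String) (out : String) : Decidable (Spec_solution_15 line arr out) := by unfold Spec_solution_15; infer_instance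

-- ===== CLAIM (what is proved, stated in full; the proofs are below) =====
def Claim_equal_solution_15 : Prop := ∀ (line : String) (arr : List String), Dom_solution_15 line arr → Spec_solution_15 line arr (solution_15 line arr)

-- ===== LEMMAS AND PROOFS =====

-- the per-line stop test of A: is the one-character string [c] an element of arr?
def pvPred (arr : List String) (c : Char) : Bool := arr.contains (String.ofList [c])

-- common characterisation of what both programs do to one line
def pvNorm (arr : List String) (l : List Char) : List Char :=
  match l.findIdx? (pvPred arr) with
  | none => l
  | some i => PySem.Chars.rstrip (l.take i)

theorem pvRstrip_length_le (s : List Char) : (PySem.Chars.rstrip s).length ≤ s.length := by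
  simp [PySem.Chars.rstrip]
  simpa using List.length_dropWhile_le PySem.Chars.isspace s.reverse

theorem pvRstrip_idem (s : List Char) :
    PySem.Chars.rstrip (PySem.Chars.rstrip s) = PySem.Chars.rstrip s := by
  simp [PySem.Chars.rstrip, List.dropWhile_idempotent]

-- once the state is a fixed point of rstrip and shorter than every remaining index, A's inner loop is inert
theorem pvTailFix (arr : List String) (t : List Char) :
    ∀ (k : Nat) (s : List Char), s.length ≤ k → PySem.Chars.rstrip s = s →
    (PySem.List.enumerate t (k : Int)).foldl
      (fun s p =>
        if arr.contains (String.ofList [p.2]) then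
          PySem.Chars.rstrip (PySem.List.slice s none (some p.1))
        else s) s = s := by
  induction t with
  | nil => intro k s _ _; simp [PySem.List.enumerate]
  | cons c t ih =>
    intro k s hlen hfix
    rw [PySem.List.enumerate_cons, List.foldl_cons]
    have hslice : PySem.List.slice s none (some (k : Int)) = s := by
      rw [PySem.List.slice_to_natCast, List.take_of_length_le hlen]
    have hk1 : (k : Int) + 1 = ((k + 1 : Nat) : Int) := by push_cast; ring
    by_cases hc : arr.contains (String.ofList [c])
    · simp only [hc, if_pos, hslice, hfix, hk1]
      exact ih (k + 1) s (by omega) hfix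
    · simp only [hc, if_neg, Bool.false_eq_true, not_false_iff, hk1]
      exact ih (k + 1) s (by omega) hfix

-- a stop string is a one-character string of arr, and its character satisfies pvPred
theorem pvStopChar {arr : List String} {c : String}
    (hc : c ∈ arr.filter (fun c => PySem.Str.len c == 1)) :
    ∃ ch, c.toList = [ch] ∧ pvPred arr ch = true := by
  rcases List.mem_filter.mp hc with ⟨hmem, hlen⟩
  have hlen1 : c.toList.length = 1 := by
    have := beq_iff_eq.mp hlen
    rw [PySem.Str.len_eq] at this
    exact_mod_cast this
  obtain ⟨ch, hch⟩ := List.length_eq_one_iff.mp hlen1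
  refine ⟨ch, hch, ?_⟩
  have : String.ofList [ch] = c := by rw [← hch, String.ofList_toList]
  exact List.contains_iff_mem.mpr (this ▸ hmem)

theorem pvSingletonPrefixAt {l : List Char} {ch : Char} {n : Nat}
    (h : [ch] <+: l.drop n) : ∃ hn : n < l.length, l[n] = ch := by
  obtain ⟨t, ht⟩ := h
  have h2 : l[n]? = some ch := by rw [← List.head?_drop, ← ht]; rfl
  rcases List.getElem?_eq_some_iff.mp h2 with ⟨hn, hv⟩
  exact ⟨hn, hv⟩

-- A's inner loop computes pvNorm
theorem pvInnerA (arr : List String) (l : List Char) :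
    (PySem.List.enumerate l 0).foldl
      (fun s p =>
        if arr.contains (String.ofList [p.2]) then
          PySem.Chars.rstrip (PySem.List.slice s none (some p.1))
        else s) l = pvNorm arr l := by
  unfold pvNorm
  cases h : l.findIdx? (pvPred arr) with
  | none =>
    have hno := List.findIdx?_eq_none_iff.mp h
    rw [PySem.List.foldl_congr_mem _ _ (fun s _ => s) _ (fun s p hp => by
      rcases (PySem.List.mem_enumerate_iff _ _ _).mp hp with ⟨k, hk, rfl⟩
      have hpf : pvPred arr l[k] = false := hno _ (l.getElem_mem hk)
      have hnm : String.ofList [l[k]] ∉ arr := fun hm => by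
        simp [pvPred] at hpf; exact hpf hm
      simp [hnm])]
    exact PySem.List.foldl_ignore _ _
  | some i =>
    rcases List.findIdx?_eq_some_iff_getElem.mp h with ⟨hi, hpi, hmin⟩
    have hl : l.take i ++ l[i] :: l.drop (i + 1) = l := by
      rw [List.getElem_cons_drop hi, List.take_append_drop]
    have hlen : (l.take i).length = i := by simp [List.length_take]; omega
    have henum : PySem.List.enumerate l 0 =
        PySem.List.enumerate (l.take i) 0 ++
          ((i : Int), l[i]) :: PySem.List.enumerate (l.drop (i + 1)) ((i : Int) + 1) := by
      conv_lhs => rw [← hl]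
      rw [PySem.List.enumerate_append, PySem.List.enumerate_cons, hlen]
      norm_num
    rw [henum, List.foldl_append, List.foldl_cons]
    -- before the first hit nothing happens
    have hpre : (PySem.List.enumerate (l.take i) 0).foldl
        (fun s p =>
          if arr.contains (String.ofList [p.2]) then
            PySem.Chars.rstrip (PySem.List.slice s none (some p.1))
          else s) l = l := by
      rw [PySem.List.foldl_congr_mem _ _ (fun s _ => s) _ (fun s p hp => by
        rcases (PySem.List.mem_enumerate_iff _ _ _).mp hp with ⟨k, hk, rfl⟩
        have hki : k < i := by rw [hlen] at hk; exact hk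
        have hpf : pvPred arr (l[k]'(by omega)) = false :=
          Bool.eq_false_iff.mpr (hmin k hki)
        have hnm : String.ofList [l[k]'(by omega)] ∉ arr := fun hm => by
          simp [pvPred] at hpf; exact hpf hm
        simp [hnm])]
      exact PySem.List.foldl_ignore _ _
    rw [hpre]
    -- the first hit truncates and rstrips
    have hcond : arr.contains (String.ofList [l[i]]) = true := hpi
    simp only [hcond, if_pos, PySem.List.slice_to_natCast]
    -- everything after it is inert
    have hk1 : (i : Int) + 1 = ((i + 1 : Nat) : Int) := by push_cast; ring
    rw [hk1]
    exact pvTailFix arr _ (i + 1) _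
      (le_trans (pvRstrip_length_le _) (by rw [hlen]; omega))
      (pvRstrip_idem _)

-- B's positions are exactly the hit positions; its minimum is the first stop index
theorem pvInnerB (arr : List String) (l : List Char) :
    (match PySem.List.min?
        (((arr.filter (fun c => PySem.Str.len c == 1)).map
            (fun c => PySem.Chars.find l c.toList)).filter (fun p => decide (0 ≤ p)))
        (fun x => x) with
      | some m => PySem.Chars.rstrip (PySem.List.slice l none (some m))
      | none => l) = pvNorm arr l := by
  unfold pvNorm
  cases h : l.findIdx? (pvPred arr) with
  | none =>
    have hno := List.findIdx?_eq_none_iff.mp h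
    have hempty :
        (((arr.filter (fun c => PySem.Str.len c == 1)).map
            (fun c => PySem.Chars.find l c.toList)).filter (fun p => decide (0 ≤ p))) = [] := by
      rw [List.filter_eq_nil_iff]
      rintro p hp
      rcases List.mem_map.mp hp with ⟨c, hc, rfl⟩
      obtain ⟨ch, hch, hpred⟩ := pvStopChar hc
      simp only [decide_eq_true_eq]
      intro hge
      have hinf : c.toList <:+: l := (PySem.Chars.find_nonneg_iff _ _).mp hge
      rw [hch] at hinf
      have hmem : ch ∈ l := (List.singleton_infix_iff _ _).mp hinf
      exact absurd hpred (by simp [hno ch hmem])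
    rw [hempty]
    rfl
  | some i =>
    rcases List.findIdx?_eq_some_iff_getElem.mp h with ⟨hi, hpi, hmin⟩
    set ps := (((arr.filter (fun c => PySem.Str.len c == 1)).map
        (fun c => PySem.Chars.find l c.toList)).filter (fun p => decide (0 ≤ p))) with hps
    -- (i : Int) is one of the positions
    have hiMem : (i : Int) ∈ ps := by
      have hcmem : String.ofList [l[i]] ∈ arr := List.contains_iff_mem.mp hpi
      have hclist : (String.ofList [l[i]]).toList = [l[i]] := String.toList_ofList
      have hstop : String.ofList [l[i]] ∈ arr.filter (fun c => PySem.Str.len c == 1) := by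
        refine List.mem_filter.mpr ⟨hcmem, ?_⟩
        simp [PySem.Str.len_eq, hclist]
      have hinf : [l[i]] <:+: l := (List.singleton_infix_iff _ _).mpr (l.getElem_mem hi)
      have hge : 0 ≤ PySem.Chars.find l [l[i]] := (PySem.Chars.find_nonneg_iff _ _).mpr hinf
      obtain ⟨hpre, hminf⟩ := PySem.Chars.find_spec hge
      set n := (PySem.Chars.find l [l[i]]).toNat with hn
      obtain ⟨hnlt, hnv⟩ := pvSingletonPrefixAt hpre
      have h1 : i ≤ n := by
        by_contra hcon
        exact hmin n (by omega) (by rw [hnv]; exact hpi)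
      have h2 : n ≤ i := by
        by_contra hcon
        exact hminf i (by omega) ⟨l.drop (i + 1), by simp [List.getElem_cons_drop hi]⟩
      have hni : n = i := by omega
      have hfind : PySem.Chars.find l [l[i]] = (i : Int) := by
        rw [← Int.toNat_of_nonneg hge, ← hn, hni]
      refine List.mem_filter.mpr ⟨?_, by simp⟩
      exact List.mem_map.mpr ⟨String.ofList [l[i]], hstop, by rw [hclist, hfind]⟩
    -- every position is ≥ i
    have hLB : ∀ p ∈ ps, (i : Int) ≤ p := by
      intro p hp
      rcases List.mem_filter.mp hp with ⟨hp1, hp2⟩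
      rcases List.mem_map.mp hp1 with ⟨c, hc, rfl⟩
      obtain ⟨ch, hch, hpred⟩ := pvStopChar hc
      have hge : 0 ≤ PySem.Chars.find l c.toList := by simpa using hp2
      have hge' : 0 ≤ PySem.Chars.find l [ch] := hch ▸ hge
      obtain ⟨hpre, _⟩ := PySem.Chars.find_spec hge'
      obtain ⟨hnlt, hnv⟩ := pvSingletonPrefixAt hpre
      have hle : i ≤ (PySem.Chars.find l [ch]).toNat := by
        by_contra hcon
        exact hmin (PySem.Chars.find l [ch]).toNat (by omega) (by rw [hnv]; exact hpred)
      rw [hch, ← Int.toNat_of_nonneg hge']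
      exact_mod_cast hle
    -- hence the minimum is exactly i
    obtain ⟨m, hm⟩ : ∃ m, PySem.List.min? ps (fun x => x) = some m := by
      cases hm : PySem.List.min? ps (fun x => x) with
      | none =>
        rw [PySem.List.min?_eq_none_iff] at hm
        rw [hm] at hiMem; cases hiMem
      | some m => exact ⟨m, rfl⟩
    have hmi : m = (i : Int) :=
      le_antisymm (PySem.List.min?_isMin hm _ hiMem) (hLB m (PySem.List.min?_mem hm))
    rw [hm, hmi]
    simp [PySem.List.slice_to_natCast]

-- ===== VERDICT (by name: the statement is the Claim_ definition above) =====
theorem solution_15_spec : Claim_equal_solution_15 := by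
  intro line arr _
  show solution_15 line arr = solution_15_alt line arr
  unfold solution_15 solution_15_alt
  simp only []
  congr 1
  have hA : ∀ acc, List.foldl
      (fun mas le => mas ++ [(PySem.List.enumerate le 0).foldl
        (fun s p =>
          if arr.contains (String.ofList [p.2]) then
            PySem.Chars.rstrip (PySem.List.slice s none (some p.1))
          else s) le]) acc (PySem.Chars.splitOn line.toList ['\n'])
      = acc ++ (PySem.Chars.splitOn line.toList ['\n']).map (pvNorm arr) := by
    intro acc
    rw [← PySem.List.foldl_append_singleton_eq_map (f := pvNorm arr)]
    exact PySem.List.foldl_congr_mem _ _ _ _ (fun acc le _ => by rw [pvInnerA])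
  have hB : ∀ acc, List.foldl
      (fun out l =>
        match PySem.List.min?
            (((arr.filter (fun c => PySem.Str.len c == 1)).map
                (fun c => PySem.Chars.find l c.toList)).filter (fun p => decide (0 ≤ p)))
            (fun x => x) with
        | some m => out ++ [PySem.Chars.rstrip (PySem.List.slice l none (some m))]
        | none => out ++ [l]) acc (PySem.Chars.splitOn line.toList ['\n'])
      = acc ++ (PySem.Chars.splitOn line.toList ['\n']).map (pvNorm arr) := by
    intro acc
    rw [← PySem.List.foldl_append_singleton_eq_map (f := pvNorm arr)]
    refine PySem.List.foldl_congr_mem _ _ _ _ (fun acc l _ => ?_)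
    rw [← pvInnerB arr l]
    cases PySem.List.min?
        (((arr.filter (fun c => PySem.Str.len c == 1)).map
            (fun c => PySem.Chars.find l c.toList)).filter (fun p => decide (0 ≤ p)))
        (fun x => x) <;> rfl
  rw [hA, hB]
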